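-- pv_equiv track=rewrite | github.com/oojiang/aoc-2024 | 20/logic.py | get_cheats2
-- ===== SOURCE A (Python) =====
-- from typing import List, Tuple, TypeAlias
--
-- MAX_CHEAT_TIME = 20
--
-- def get_cheats2(
--     racetrack: List[List[str]],
--     path: List[Tuple[int, int]],
--     max_cheat_time: int = MAX_CHEAT_TIME
--     ) -> List[int]:
--     cheats = []
--
--     for start in range(len(path)):
--         for end in range(start + 1, len(path)):
--             r_start, c_start = path[start]
--             r_end, c_end = path[end]
--             cheat_time = abs(r_end - r_start) + abs(c_end - c_start)
--             time_saved = end - start - cheat_time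
--             if cheat_time <= max_cheat_time:
--                 cheats.append(time_saved)
--     return cheats
-- ===== SOURCE B (Python) =====
-- MAX_CHEAT_TIME = 20
--
-- def get_cheats2(racetrack, path, max_cheat_time=MAX_CHEAT_TIME):
--     # Suffix decomposition: peel the head off the remaining path and compare it
--     # against the enumerated tail; the time saved is the relative offset minus
--     # the cheat distance, so no absolute indices are needed.
--     cheats = []
--     rest = path
--     while rest:
--         (r1, c1), rest = rest[0], rest[1:]
--         cheats += [
--             k + 1 - (abs(r2 - r1) + abs(c2 - c1))
--             for k, (r2, c2) in enumerate(rest)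
--             if abs(r2 - r1) + abs(c2 - c1) <= max_cheat_time
--         ]
--     return cheats
-- ===== Notes on version B (the rewrite author's own statement) =====
-- stated objective: alternative
-- what changed: Replaced the nested index loops with path[start]/path[end] lookups by an index-free suffix decomposition: peel the head off the remaining path and build each block from the enumerated tail, the time saved being the relative offset minus the Manhattan distance.
import Mathlib
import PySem

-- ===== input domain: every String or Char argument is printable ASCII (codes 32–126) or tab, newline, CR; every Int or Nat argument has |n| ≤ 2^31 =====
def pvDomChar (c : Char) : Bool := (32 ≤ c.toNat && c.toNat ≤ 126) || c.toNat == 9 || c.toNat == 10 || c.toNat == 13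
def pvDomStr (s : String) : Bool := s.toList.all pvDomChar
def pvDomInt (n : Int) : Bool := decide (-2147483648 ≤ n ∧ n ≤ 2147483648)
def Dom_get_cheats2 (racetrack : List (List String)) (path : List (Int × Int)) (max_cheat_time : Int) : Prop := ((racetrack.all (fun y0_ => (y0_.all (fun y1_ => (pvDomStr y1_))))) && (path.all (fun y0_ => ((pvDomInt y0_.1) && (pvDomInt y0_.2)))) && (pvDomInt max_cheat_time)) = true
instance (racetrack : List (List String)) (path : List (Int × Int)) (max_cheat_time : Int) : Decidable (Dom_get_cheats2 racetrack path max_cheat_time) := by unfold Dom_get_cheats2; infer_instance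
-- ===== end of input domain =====

-- B replaces A's nested index loops by an index-free suffix decomposition (head vs enumerated tail); alternative structure, same cost.


-- ===== PORT A =====
-- literal port of A's nested index loops; path[start]/path[end] are always in
-- range (start < end < len(path)), so pyGetD's default is never consulted
def get_cheats2 (racetrack : List (List String)) (path : List (Int × Int)) (max_cheat_time : Int) : List Int :=
  (PySem.List.pyRange 0 (path.length : Int) 1).foldl (fun cheats start =>
    (PySem.List.pyRange (start + 1) (path.length : Int) 1).foldl (fun cheats end_ =>
      let ps := PySem.List.pyGetD path start (0, 0)
      let pe := PySem.List.pyGetD path end_ (0, 0)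
      let cheat_time := |pe.1 - ps.1| + |pe.2 - ps.2|
      let time_saved := end_ - start - cheat_time
      if cheat_time ≤ max_cheat_time then cheats ++ [time_saved] else cheats) cheats) []

-- ===== PORT B =====
-- B's while loop peeling the head off the remaining path = structural recursion
def altGo (m : Int) : List (Int × Int) → List Int
  | [] => []
  | (r1, c1) :: rest =>
      ((PySem.List.enumerate rest 0).filterMap (fun kp =>
        if |kp.2.1 - r1| + |kp.2.2 - c1| ≤ m then
          some (kp.1 + 1 - (|kp.2.1 - r1| + |kp.2.2 - c1|))
        else none)) ++ altGo m rest

def get_cheats2_alt (racetrack : List (List String)) (path : List (Int × Int)) (max_cheat_time : Int) : List Int :=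
  altGo max_cheat_time path

-- ===== PRECONDITION & SPEC =====
def Spec_get_cheats2 (racetrack : List (List String)) (path : List (Int × Int)) (max_cheat_time : Int) (out : List Int) : Prop := out = get_cheats2_alt racetrack path max_cheat_time
instance (racetrack : List (List String)) (path : List (Int × Int)) (max_cheat_time : Int) (out : List Int) : Decidable (Spec_get_cheats2 racetrack path max_cheat_time out) := by unfold Spec_get_cheats2; infer_instance

-- ===== CLAIM (what is proved, stated in full; the proofs are below) =====
def Claim_equal_get_cheats2 : Prop := ∀ (racetrack : List (List String)) (path : List (Int × Int)) (max_cheat_time : Int), Dom_get_cheats2 racetrack path max_cheat_time → Spec_get_cheats2 racetrack path max_cheat_time (get_cheats2 racetrack path max_cheat_time)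

-- ===== LEMMAS AND PROOFS =====

-- A's inner loop result (filter-then-map over the index range), as a function of the start index
def innerA (path : List (Int × Int)) (m : Int) (start : Int) : List Int :=
  ((PySem.List.pyRange (start + 1) (path.length : Int) 1).filter (fun end_ =>
      decide (|(PySem.List.pyGetD path end_ (0, 0)).1 - (PySem.List.pyGetD path start (0, 0)).1| +
              |(PySem.List.pyGetD path end_ (0, 0)).2 - (PySem.List.pyGetD path start (0, 0)).2| ≤ m))).map
    (fun end_ =>
      end_ - start - (|(PySem.List.pyGetD path end_ (0, 0)).1 - (PySem.List.pyGetD path start (0, 0)).1| +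
                      |(PySem.List.pyGetD path end_ (0, 0)).2 - (PySem.List.pyGetD path start (0, 0)).2|))

lemma pyGetD_cons_succ {α : Type} (x : α) (xs : List α) (j : Int) (h : 0 ≤ j) (d : α) :
    PySem.List.pyGetD (x :: xs) (j + 1) d = PySem.List.pyGetD xs j d := by
  rw [PySem.List.pyGetD_of_nonneg _ _ (by omega : (0:Int) ≤ j + 1),
      PySem.List.pyGetD_of_nonneg _ _ h]
  have hj : (j + 1).toNat = j.toNat + 1 := by omega
  rw [hj, List.getD_cons_succ]

lemma pyRange_shift (a b : Int) :
    PySem.List.pyRange (a + 1) (b + 1) 1 = (PySem.List.pyRange a b 1).map (· + 1) := by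
  rw [PySem.List.pyRange_one, PySem.List.pyRange_one]
  have h : (b + 1 - (a + 1)) = b - a := by ring
  rw [h, List.map_map]
  exact List.map_congr_left (fun k _ => by simp; ring)

lemma filter_map_eq_filterMap {α β : Type} (p : α → Bool) (f : α → β) (l : List α) :
    (l.filter p).map f = l.filterMap (fun a => if p a then some (f a) else none) := by
  induction l with
  | nil => simp
  | cons x xs ih =>
    by_cases h : p x = true <;> simp [h, ih]

lemma get_cheats2_eq_flatMap (racetrack : List (List String)) (path : List (Int × Int)) (m : Int) :
    get_cheats2 racetrack path m
      = (PySem.List.pyRange 0 (path.length : Int) 1).flatMap (innerA path m) := by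
  unfold get_cheats2
  have h1 : ∀ (acc : List Int) (s : Int),
      (PySem.List.pyRange (s + 1) (path.length : Int) 1).foldl (fun cheats end_ =>
        let ps := PySem.List.pyGetD path s (0, 0)
        let pe := PySem.List.pyGetD path end_ (0, 0)
        let cheat_time := |pe.1 - ps.1| + |pe.2 - ps.2|
        let time_saved := end_ - s - cheat_time
        if cheat_time ≤ m then cheats ++ [time_saved] else cheats) acc
      = acc ++ innerA path m s := by
    intro acc s
    unfold innerA
    exact PySem.List.foldl_append_ite _ _ _ _
  rw [List.foldl_ext _ (fun acc s => acc ++ innerA path m s) [] (fun acc s _ => h1 acc s),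
      PySem.List.foldl_append_eq_flatMap, List.nil_append]

lemma innerA_cons_succ (p : Int × Int) (rest : List (Int × Int)) (m s : Int) (hs : 0 ≤ s) :
    innerA (p :: rest) m (s + 1) = innerA rest m s := by
  unfold innerA
  have hN : (((p :: rest).length : Int)) = (rest.length : Int) + 1 := by
    simp
  rw [hN, show (s + 1 + 1 : Int) = (s + 1) + 1 from rfl,
      pyRange_shift (s + 1) (rest.length : Int), List.filter_map, List.map_map,
      filter_map_eq_filterMap, filter_map_eq_filterMap]
  apply List.filterMap_congr
  intro e he
  have he0 : 0 ≤ e := by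
    have := (PySem.List.mem_pyRange_one.mp he).1; omega
  have hstart : PySem.List.pyGetD (p :: rest) (s + 1) (0, 0) = PySem.List.pyGetD rest s (0, 0) :=
    pyGetD_cons_succ p rest s hs (0, 0)
  simp only [Function.comp_apply, pyGetD_cons_succ p rest e he0 (0, 0), hstart]
  split
  · congr 1; ring
  · rfl

lemma innerA_zero (p : Int × Int) (rest : List (Int × Int)) (m : Int) :
    innerA (p :: rest) m 0
      = (PySem.List.enumerate rest 0).filterMap (fun kp =>
          if |kp.2.1 - p.1| + |kp.2.2 - p.2| ≤ m then
            some (kp.1 + 1 - (|kp.2.1 - p.1| + |kp.2.2 - p.2|))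
          else none) := by
  unfold innerA
  have hN : (((p :: rest).length : Int)) = (rest.length : Int) + 1 := by simp
  rw [hN, show (0 + 1 : Int) = 0 + 1 from rfl,
      PySem.List.enumerate_eq_map_pyRange rest (0, 0),
      List.filterMap_map,
      pyRange_shift 0 (rest.length : Int), List.filter_map, List.map_map,
      filter_map_eq_filterMap]
  apply List.filterMap_congr
  intro j hj
  have hj0 : 0 ≤ j := (PySem.List.mem_pyRange_one.mp hj).1
  have hz : PySem.List.pyGetD (p :: rest) (0 : Int) (0, 0) = p :=
    PySem.List.pyGetD_zero_cons p rest (0, 0)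
  simp only [Function.comp_apply, pyGetD_cons_succ p rest j hj0 (0, 0), hz]
  by_cases hc : |(PySem.List.pyGetD rest j (0, 0)).1 - p.1| + |(PySem.List.pyGetD rest j (0, 0)).2 - p.2| ≤ m
  · simp only [hc, decide_true, if_true]
    congr 1; ring
  · simp [hc]

lemma flatMap_innerA (m : Int) (path : List (Int × Int)) :
    (PySem.List.pyRange 0 (path.length : Int) 1).flatMap (innerA path m) = altGo m path := by
  induction path with
  | nil =>
    rw [show ((([] : List (Int × Int)).length : Int)) = 0 by simp,
        PySem.List.pyRange_one_eq_nil (by omega)]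
    rfl
  | cons p rest ih =>
    obtain ⟨r1, c1⟩ := p
    have hN : ((((r1, c1) :: rest).length : Int)) = (rest.length : Int) + 1 := by simp
    rw [hN, PySem.List.pyRange_one_cons (by positivity), List.flatMap_cons,
        show (0 + 1 : Int) = 0 + 1 from rfl,
        pyRange_shift 0 (rest.length : Int), List.flatMap_map]
    rw [List.flatMap_congr (fun s hs =>
          innerA_cons_succ (r1, c1) rest m s (PySem.List.mem_pyRange_one.mp hs).1),
        ih, innerA_zero]
    rfl

-- ===== VERDICT (by name: the statement is the Claim_ definition above) =====
theorem get_cheats2_spec : Claim_equal_get_cheats2 := by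
  intro racetrack path m _
  unfold Spec_get_cheats2 get_cheats2_alt
  rw [get_cheats2_eq_flatMap, flatMap_innerA]
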